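-- pv_equiv track=rewrite | github.com/SONGJAEYEON/CodingTest_Java_Python | CodingTest/Heap/programmers_더맵게.py | solution
-- ===== SOURCE A (Python) =====
-- import heapq
--
-- def solution(scoville, K):
--     answer=0
--     heap=[]
--     for i in scoville:
--         heapq.heappush(heap, i)
--     while(heap[0]<K):
--         if len(heap)==1:
--             answer=-1
--             break
--         else:
--             n=heapq.heappop(heap)
--             m=heapq.heappop(heap)
--             heapq.heappush(heap,n+(m*2))
--             answer+=1
--     return answer
-- ===== SOURCE B (Python) =====
-- def solution(scoville, K):
--     # maintained sorted list instead of a heap; same greedy combine order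
--     lst = sorted(scoville)
--     answer = 0
--     while lst[0] < K:
--         if len(lst) == 1:
--             return -1
--         n = lst.pop(0)
--         m = lst.pop(0)
--         x = n + 2 * m
--         i = 0
--         while i < len(lst) and lst[i] < x:
--             i += 1
--         lst.insert(i, x)
--         answer += 1
--     return answer
-- ===== Notes on version B (the rewrite author's own statement) =====
-- stated objective: alternative
-- what changed: Replaces the binary heap with a sorted list maintained by linear insertion: the two smallest are popped from the front and the mix is re-inserted at its sorted position, no heap operations at all.
import Mathlib
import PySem

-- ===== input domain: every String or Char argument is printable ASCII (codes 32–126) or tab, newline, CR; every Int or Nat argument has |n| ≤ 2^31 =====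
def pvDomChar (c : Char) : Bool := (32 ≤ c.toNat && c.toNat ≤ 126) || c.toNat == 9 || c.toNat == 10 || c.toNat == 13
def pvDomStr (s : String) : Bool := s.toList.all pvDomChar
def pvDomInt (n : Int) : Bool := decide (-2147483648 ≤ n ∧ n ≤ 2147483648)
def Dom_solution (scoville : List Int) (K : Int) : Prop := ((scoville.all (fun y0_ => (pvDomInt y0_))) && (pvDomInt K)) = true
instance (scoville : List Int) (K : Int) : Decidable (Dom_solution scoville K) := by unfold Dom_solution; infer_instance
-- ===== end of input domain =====

-- B replaces A's binary heap by a sorted list maintained with linear front-pops and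
-- sorted re-insertion: a different data representation of the same greedy, not faster.

-- ===== PORT A =====
-- A's heap is ported by heapq's observable contract on Int elements: the heap holds a
-- multiset (push appends, heap[0] and heappop are the minimum) — exact for Int values,
-- where equal elements are indistinguishable.  The loop drops the length by one per
-- iteration, so fuel = initial length makes the recursion total without changing any
-- value reached from a nonempty input (Pre_).
def loopA (K : Int) : Nat → List Int → Int → Int
  | 0, _, answer => answer
  | fuel + 1, heap, answer =>
    match heap.min? with
    | none => answer                  -- heap[0] on an empty heap: IndexError, outside Pre_
    | some n =>
      if n < K then
        if heap.length == 1 then -1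
        else
          let h1 := heap.erase n      -- n = heappop(heap)
          match h1.min? with
          | none => answer            -- unreachable (len ≥ 2 here)
          | some m =>                  -- m = heappop(heap)
            loopA K fuel (h1.erase m ++ [n + m * 2]) (answer + 1)  -- heappush(heap, n+(m*2))
      else answer

def solution (scoville : List Int) (K : Int) : Int :=
  loopA K scoville.length (scoville.foldl (fun heap i => heap ++ [i]) []) 0

-- ===== PORT B =====
-- lst.insert(i, x) at the first i with lst[i] ≥ x (the inner while of Source B)
def insort (x : Int) : List Int → List Int
  | [] => [x]
  | y :: t => if y < x then y :: insort x t else x :: y :: t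

def loopB (K : Int) : Nat → List Int → Int → Int
  | 0, _, answer => answer
  | fuel + 1, lst, answer =>
    match lst with
    | [] => answer                    -- lst[0] on empty: IndexError, outside Pre_
    | a :: rest =>
      if a < K then
        match rest with
        | [] => -1                    -- len(lst) == 1
        | b :: rest' =>               -- n = lst.pop(0); m = lst.pop(0)
          loopB K fuel (insort (a + 2 * b) rest') (answer + 1)
      else answer

def solution_alt (scoville : List Int) (K : Int) : Int :=
  let lst := PySem.List.sorted scoville (fun x => x)
  loopB K lst.length lst 0

-- ===== PRECONDITION & SPEC =====
-- Pre_ excludes the empty list, on which A raises IndexError (heap[0] of an empty heap).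
def Pre_solution (scoville : List Int) (K : Int) : Prop := scoville ≠ []
instance (scoville : List Int) (K : Int) : Decidable (Pre_solution scoville K) := by
  unfold Pre_solution; infer_instance
def pvWitness_solution : List Int × Int := ([1, 2, 3, 9, 10, 12], 7)

def Spec_solution (scoville : List Int) (K : Int) (out : Int) : Prop := out = solution_alt scoville K
instance (scoville : List Int) (K : Int) (out : Int) : Decidable (Spec_solution scoville K out) := by
  unfold Spec_solution; infer_instance

-- ===== CLAIM (what is proved, stated in full; the proofs are below) =====
def Claim_equal_solution : Prop := ∀ (scoville : List Int) (K : Int), Dom_solution scoville K → Pre_solution scoville K → Spec_solution scoville K (solution scoville K)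

-- ===== LEMMAS AND PROOFS =====

theorem foldl_push (l acc : List Int) :
    l.foldl (fun heap i => heap ++ [i]) acc = acc ++ l := by
  induction l generalizing acc with
  | nil => simp
  | cons x t ih => simp [List.foldl, ih]

theorem insort_perm (x : Int) (l : List Int) : (insort x l).Perm (x :: l) := by
  induction l with
  | nil => simp [insort]
  | cons y t ih =>
    by_cases h : y < x
    · simpa [insort, h] using ((ih.cons y).trans (List.Perm.swap x y t))
    · simp [insort, h]

theorem insort_pairwise (x : Int) (l : List Int) (hl : l.Pairwise (· ≤ ·)) :
    (insort x l).Pairwise (· ≤ ·) := by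
  induction l with
  | nil => simp [insort]
  | cons y t ih =>
    rcases List.pairwise_cons.mp hl with ⟨hy, ht⟩
    by_cases h : y < x
    · rw [insort, if_pos h]
      refine List.pairwise_cons.mpr ⟨?_, ih ht⟩
      intro z hz
      rcases List.mem_cons.mp ((insort_perm x t).mem_iff.mp hz) with rfl | hz
      · exact le_of_lt h
      · exact hy z hz
    · rw [insort, if_neg h]
      refine List.pairwise_cons.mpr ⟨?_, hl⟩
      intro z hz
      rcases List.mem_cons.mp hz with rfl | hz
      · exact le_of_not_gt h
      · exact le_trans (le_of_not_gt h) (hy z hz)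

-- the minimum of any permutation of a ≤-sorted nonempty list is its head
theorem min?_of_perm_sorted (heap : List Int) (a : Int) (t : List Int)
    (hp : heap.Perm (a :: t)) (hs : (a :: t).Pairwise (· ≤ ·)) :
    heap.min? = some a := by
  rcases List.pairwise_cons.mp hs with ⟨ha, _⟩
  refine List.min?_eq_some_iff.mpr ⟨hp.mem_iff.mpr (by simp), ?_⟩
  intro b hb
  rcases List.mem_cons.mp (hp.mem_iff.mp hb) with rfl | hb
  · exact le_refl _
  · exact ha b hb

theorem loop_eq (K : Int) : ∀ (fuel : Nat) (l heap : List Int) (answer : Int),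
    l.Pairwise (· ≤ ·) → heap.Perm l → loopA K fuel heap answer = loopB K fuel l answer := by
  intro fuel
  induction fuel with
  | zero => intro l heap answer _ _; rfl
  | succ fuel ih =>
    intro l heap answer hs hp
    match l with
    | [] =>
      have : heap = [] := List.Perm.eq_nil hp
      subst this
      simp [loopA, loopB]
    | a :: t =>
      have hmin : heap.min? = some a := min?_of_perm_sorted heap a t hp hs
      by_cases hK : a < K
      · match t with
        | [] =>
          have hlen : heap.length = 1 := by simpa using hp.length_eq
          simp [loopA, loopB, hmin, hK, hlen]
        | b :: t' =>
          have hlen : heap.length = t'.length + 2 := by simpa using hp.length_eq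
          have hne : (heap.length == 1) = false := by simp [hlen]
          have hp1 : (heap.erase a).Perm (b :: t') := by
            simpa [List.erase_cons_head] using hp.erase a
          have hst : (b :: t').Pairwise (· ≤ ·) := (List.pairwise_cons.mp hs).2
          have hmin1 : (heap.erase a).min? = some b := min?_of_perm_sorted _ b t' hp1 hst
          have hp2 : ((heap.erase a).erase b).Perm t' := by
            simpa [List.erase_cons_head] using hp1.erase b
          have hperm : ((heap.erase a).erase b ++ [a + b * 2]).Perm (insort (a + 2 * b) t') := by
            rw [show a + b * 2 = a + 2 * b from by ring]
            exact ((hp2.append_right [a + 2 * b]).trans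
              (List.perm_append_singleton _ t')).trans (insort_perm (a + 2 * b) t').symm
          have hsorted : (insort (a + 2 * b) t').Pairwise (· ≤ ·) :=
            insort_pairwise _ _ (List.pairwise_cons.mp hst).2
          simp only [loopA, loopB, hmin, hK, if_pos, hne, Bool.false_eq_true, if_false, hmin1]
          exact ih _ _ _ hsorted hperm
      · simp [loopA, loopB, hmin, hK]

-- ===== VERDICT (by name: the statement is the Claim_ definition above) =====
theorem solution_spec : Claim_equal_solution := by
  intro scoville K _ _
  unfold Spec_solution solution solution_alt
  rw [foldl_push]
  simp only [List.nil_append]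
  rw [PySem.List.length_sorted]
  exact loop_eq K scoville.length _ scoville 0
    (PySem.List.sorted_pairwise scoville (fun x => x))
    (PySem.List.sorted_perm scoville (fun x => x) false).symm
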